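-- pv_equiv track=rewrite | github.com/norok2/mnkgame | mnkgame/__init__.py | blessify
-- ===== SOURCE A (Python) =====
-- def blessify(
--         text,
--         pretty=False):
--     """
--     Preprocess text to be used with `blessed` / `blessings`.
--
--     Args:
--         text (str): The input text.
--         pretty (bool): Use terminal effects (if available).
--
--     Returns:
--         text (str): The output text.
--     """
--     substs = dict(
--         o='bold', v='reverse', x='normal',
--         K='black', R='red', G='green', Y='yellow', B='blue', M='magenta',
--         C='cyan', W='white')
--     if pretty:
--         for key, val in substs.items():
--             text = text.replace('{' + key + '}', '{t.' + val + '}')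
--     else:
--         for key in substs.keys():
--             text = text.replace('{' + key + '}', '')
--     return text
-- ===== SOURCE B (Python) =====
-- _SUBSTS = {
--     'o': 'bold', 'v': 'reverse', 'x': 'normal',
--     'K': 'black', 'R': 'red', 'G': 'green', 'Y': 'yellow', 'B': 'blue',
--     'M': 'magenta', 'C': 'cyan', 'W': 'white'}
--
--
-- def blessify(
--         text,
--         pretty=False):
--     """Single left-to-right scan: replace each '{k}' token via a lookup table."""
--     out = []
--     i = 0
--     n = len(text)
--     while i < n:
--         if text[i] == '{' and i + 2 < n and text[i + 2] == '}' \
--                 and text[i + 1] in _SUBSTS: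
--             if pretty:
--                 out.append('{t.' + _SUBSTS[text[i + 1]] + '}')
--             i += 3
--         else:
--             out.append(text[i])
--             i += 1
--     return ''.join(out)
-- ===== Notes on version B (the rewrite author's own statement) =====
-- stated objective: alternative
-- what changed: Replaced the 11 sequential full-string str.replace passes with one left-to-right scan that recognizes each color/style token via a dict lookup and emits the replacement (or drops the token) in a single pass.
-- outside the precondition, e.g. on blessify('{K{o}}', False): A returns '', B returns '{K}'; on blessify('{o{K}}', False): A returns '{o}', B returns '{o}'
import Mathlib
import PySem

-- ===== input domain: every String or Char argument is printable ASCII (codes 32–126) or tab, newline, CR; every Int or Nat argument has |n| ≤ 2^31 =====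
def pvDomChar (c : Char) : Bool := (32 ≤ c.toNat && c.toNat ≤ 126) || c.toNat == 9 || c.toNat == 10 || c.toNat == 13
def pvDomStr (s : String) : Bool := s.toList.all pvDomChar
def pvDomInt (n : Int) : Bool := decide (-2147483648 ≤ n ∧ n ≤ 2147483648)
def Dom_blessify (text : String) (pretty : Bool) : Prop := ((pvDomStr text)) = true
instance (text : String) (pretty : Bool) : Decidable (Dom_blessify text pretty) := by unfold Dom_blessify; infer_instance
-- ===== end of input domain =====

-- B replaces A's 11 sequential full-string replace passes by ONE left-to-right scan with a
-- lookup table (same output on Pre_; not measured faster, the objective is the alternative algorithm).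

-- ===== PORT A =====
def pvSubsts : List (String × String) :=
  [("o", "bold"), ("v", "reverse"), ("x", "normal"),
   ("K", "black"), ("R", "red"), ("G", "green"), ("Y", "yellow"), ("B", "blue"),
   ("M", "magenta"), ("C", "cyan"), ("W", "white")]

def blessify (text : String) (pretty : Bool) : String :=
  if pretty then
    pvSubsts.foldl (fun s kv => PySem.Str.replace s ("{" ++ kv.1 ++ "}") ("{t." ++ kv.2 ++ "}")) text
  else
    pvSubsts.foldl (fun s kv => PySem.Str.replace s ("{" ++ kv.1 ++ "}") "") text

-- ===== PORT B =====
def pvSubstsC : List (Char × List Char) :=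
  [('o', ['b','o','l','d']), ('v', ['r','e','v','e','r','s','e']), ('x', ['n','o','r','m','a','l']),
   ('K', ['b','l','a','c','k']), ('R', ['r','e','d']), ('G', ['g','r','e','e','n']),
   ('Y', ['y','e','l','l','o','w']), ('B', ['b','l','u','e']), ('M', ['m','a','g','e','n','t','a']),
   ('C', ['c','y','a','n']), ('W', ['w','h','i','t','e'])]

def pvIsKey (b : Char) : Bool := (pvSubstsC.lookup b).isSome

def pvRep (b : Char) (pretty : Bool) : List Char :=
  if pretty then '{' :: 't' :: '.' :: ((pvSubstsC.lookup b).getD []) ++ ['}'] else []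

-- the while loop of Source B: one scan, 3-char window, table lookup
def pvScan (pretty : Bool) : List Char → List Char
  | a :: b :: c :: rest =>
      if a = '{' ∧ c = '}' ∧ pvIsKey b then pvRep b pretty ++ pvScan pretty rest
      else a :: pvScan pretty (b :: c :: rest)
  | l => l
termination_by l => l.length
decreasing_by all_goals first | (simp; omega) | simp

def blessify_alt (text : String) (pretty : Bool) : String :=
  String.ofList (pvScan pretty text.toList)

-- ===== PRECONDITION & SPEC =====
-- When pretty is false, Pre_ excludes texts in which a color/style token directly touches a
-- further brace (an opening brace right before a token, or a closing brace right after one):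
-- there A's sequential deletion passes can merge surrounding characters into a NEW token whose
-- deletion depends on the accidental dict order, while B removes only the tokens present in the
-- input (see the cited examples '{K{o}}' and '{o{K}}').
def pvBadPats : List String :=
  ["{{o}", "{o}}", "{{v}", "{v}}", "{{x}", "{x}}", "{{K}", "{K}}", "{{R}", "{R}}",
   "{{G}", "{G}}", "{{Y}", "{Y}}", "{{B}", "{B}}", "{{M}", "{M}}", "{{C}", "{C}}",
   "{{W}", "{W}}"]

def Pre_blessify (text : String) (pretty : Bool) : Prop :=
  pretty = true ∨ ∀ p ∈ pvBadPats, PySem.Str.isIn p text = false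

instance (text : String) (pretty : Bool) : Decidable (Pre_blessify text pretty) := by
  unfold Pre_blessify; infer_instance

def pvWitness_blessify : String × Bool := ("{o} win {R}!", false)

def Spec_blessify (text : String) (pretty : Bool) (out : String) : Prop := out = blessify_alt text pretty
instance (text : String) (pretty : Bool) (out : String) : Decidable (Spec_blessify text pretty out) := by
  unfold Spec_blessify; infer_instance

-- ===== CLAIM (what is proved, stated in full; the proofs are below) =====
def Claim_equal_blessify : Prop := ∀ (text : String) (pretty : Bool), Dom_blessify text pretty → Pre_blessify text pretty → Spec_blessify text pretty (blessify text pretty)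

-- ===== LEMMAS AND PROOFS =====

-- the Python-exact replace, re-expressed as a fuel-free recursion
def pvRep1 (old new : List Char) : List Char → List Char
  | [] => []
  | c :: t =>
    if old.isPrefixOf (c :: t) = true ∧ old ≠ [] then
      new ++ pvRep1 old new (t.drop (old.length - 1))
    else
      c :: pvRep1 old new t
termination_by l => l.length
decreasing_by
  · simp only [List.length_cons, List.length_drop]; omega
  · simp

def pvTok (k : Char) : List Char := ['{', k, '}']

def pvKeysC : List Char := ['o','v','x','K','R','G','Y','B','M','C','W']

-- the A-side fold, at the list level
def pvAL (pretty : Bool) (cs : List Char) : List Char :=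
  pvSubstsC.foldl (fun s kv => pvRep1 (pvTok kv.1) (pvRep kv.1 pretty) s) cs

def pvTokPow (k : Char) : Nat → List Char
  | 0 => []
  | n + 1 => '{' :: k :: '}' :: pvTokPow k n

-- interleaving of a word with runs of deleted tokens
def pvInter (k : Char) : List Char → List Char → Prop
  | [], _ => True
  | c :: w, S => ∃ n S', S = pvTokPow k n ++ c :: S' ∧ pvInter k w S'

def pvGood (cs : List Char) : Prop :=
  ∀ k ∈ pvKeysC, ¬ (['{','{',k,'}'] <:+: cs) ∧ ¬ (['{',k,'}','}'] <:+: cs)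

def pvHeadSafe (l : List Char) : Prop := ∀ e R, l = '{' :: e :: '}' :: R → e ∉ pvKeysC

lemma pvRep1_nil (old new : List Char) : pvRep1 old new [] = [] := by simp [pvRep1]

lemma pvGo_spec (old new : List Char) (h : old ≠ []) :
    ∀ fuel l acc, l.length ≤ fuel →
      PySem.Chars.replace.go old new fuel l acc = acc.reverse ++ pvRep1 old new l := by
  intro fuel
  induction fuel with
  | zero =>
      intro l acc hl
      have : l = [] := List.eq_nil_of_length_eq_zero (by omega)
      subst this
      rw [PySem.Chars.replace.go, pvRep1_nil]
  | succ fuel ih =>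
      intro l acc hl
      cases l with
      | nil =>
          rw [PySem.Chars.replace.go, pvRep1_nil, List.append_nil]
          omega
      | cons c t =>
          rw [PySem.Chars.replace.go]
          by_cases hp : old.isPrefixOf (c :: t) = true
          · rw [if_pos hp]
            have hol : 1 ≤ old.length := by
              cases old with
              | nil => exact absurd rfl h
              | cons a b => simp
            have hdl : (List.drop old.length (c :: t)).length ≤ fuel := by
              simp only [List.length_drop, List.length_cons]
              simp only [List.length_cons] at hl
              omega
            rw [ih _ _ hdl]
            rw [pvRep1]
            rw [if_pos ⟨hp, h⟩]
            have : List.drop old.length (c :: t) = t.drop (old.length - 1) := by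
              cases old with
              | nil => exact absurd rfl h
              | cons a b => simp
            rw [this]
            simp
          · rw [if_neg hp]
            rw [ih _ _ (by simp at hl ⊢; omega)]
            rw [pvRep1, if_neg (by rintro ⟨h1, -⟩; exact hp h1)]
            simp

lemma pvReplace_eq_rep1 (old new s : List Char) (h : old ≠ []) :
    PySem.Chars.replace s old new = pvRep1 old new s := by
  rw [PySem.Chars.replace, if_neg (by simpa using h)]
  rw [pvGo_spec old new h s.length s [] le_rfl]
  simp

lemma pvTok_prefix_iff (k : Char) (l : List Char) :
    pvTok k <+: l ↔ ∃ X, l = '{' :: k :: '}' :: X := by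
  constructor
  · rintro ⟨t, rfl⟩; exact ⟨t, rfl⟩
  · rintro ⟨X, rfl⟩; exact ⟨X, rfl⟩

lemma pvRep1_neg (k : Char) (r : List Char) (c : Char) (t : List Char)
    (h : ¬ pvTok k <+: (c :: t)) :
    pvRep1 (pvTok k) r (c :: t) = c :: pvRep1 (pvTok k) r t := by
  rw [pvRep1]
  simp only [List.isPrefixOf_iff_prefix]
  rw [if_neg]; rintro ⟨h1, -⟩; exact h h1

lemma pvRep1_pos (k : Char) (r : List Char) (X : List Char) :
    pvRep1 (pvTok k) r ('{' :: k :: '}' :: X) = r ++ pvRep1 (pvTok k) r X := by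
  rw [pvRep1]
  simp [pvTok]

lemma pvRep1_short (k : Char) (r : List Char) (l : List Char) (h : l.length < 3) :
    pvRep1 (pvTok k) r l = l := by
  match l, h with
  | [], _ => exact pvRep1_nil _ _
  | [a], _ =>
      rw [pvRep1_neg _ _ _ _ (by rw [pvTok_prefix_iff]; rintro ⟨X, hX⟩; cases hX), pvRep1_nil]
  | [a, b], _ =>
      rw [pvRep1_neg _ _ _ _ (by rw [pvTok_prefix_iff]; rintro ⟨X, hX⟩; cases hX)]
      rw [pvRep1_neg _ _ _ _ (by rw [pvTok_prefix_iff]; rintro ⟨X, hX⟩; cases hX), pvRep1_nil]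

lemma pvRep1_no_brace (k : Char) (r z X : List Char) (hz : '{' ∉ z) :
    pvRep1 (pvTok k) r (z ++ X) = z ++ pvRep1 (pvTok k) r X := by
  induction z with
  | nil => rfl
  | cons c z ih =>
      have hc : c ≠ '{' := fun h => hz (h ▸ List.mem_cons_self)
      rw [List.cons_append, pvRep1_neg]
      · rw [ih (fun h => hz (List.mem_cons_of_mem _ h))]; simp
      · rw [pvTok_prefix_iff]; rintro ⟨Y, hY⟩; exact hc (by injection hY)

lemma pvRep1_over_rep (j b : Char) (hj : j ≠ 't') (r X : List Char) (pretty : Bool)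
    (hb : '{' ∉ (pvSubstsC.lookup b).getD []) :
    pvRep1 (pvTok j) r (pvRep b pretty ++ X) = pvRep b pretty ++ pvRep1 (pvTok j) r X := by
  cases pretty with
  | false => simp [pvRep]
  | true =>
      have hshape : pvRep b true ++ X
          = '{' :: (('t' :: '.' :: ((pvSubstsC.lookup b).getD [])) ++ ('}' :: X)) := by
        simp [pvRep]
      have hshape2 : pvRep b true ++ pvRep1 (pvTok j) r X
          = '{' :: (('t' :: '.' :: ((pvSubstsC.lookup b).getD [])) ++ ('}' :: pvRep1 (pvTok j) r X)) := by
        simp [pvRep]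
      rw [hshape, hshape2]
      rw [pvRep1_neg _ _ _ _ (by
        rw [pvTok_prefix_iff]; rintro ⟨Y, hY⟩
        injection hY with _ h2
        have : 't' = j := by
          have := congrArg (fun l => l.head?) h2
          simpa using this
        exact hj this.symm)]
      congr 1
      have hz : '{' ∉ ('t' :: '.' :: ((pvSubstsC.lookup b).getD [])) := by
        intro hmem
        simp only [List.mem_cons] at hmem
        rcases hmem with h | h | h
        · exact absurd h (by decide)
        · exact absurd h (by decide)
        · exact hb h
      rw [pvRep1_no_brace _ _ _ _ hz]
      have hz2 : pvRep1 (pvTok j) r ('}' :: X) = '}' :: pvRep1 (pvTok j) r X := by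
        apply pvRep1_neg
        rw [pvTok_prefix_iff]; rintro ⟨Y, hY⟩; cases hY
      rw [hz2]

lemma pvTok_head_pass (j k : Char) (hjk : j ≠ k) (hk : k ≠ '{') (r X : List Char) :
    pvRep1 (pvTok j) r (pvTok k ++ X) = pvTok k ++ pvRep1 (pvTok j) r X := by
  show pvRep1 (pvTok j) r ('{' :: k :: '}' :: X) = _
  rw [pvRep1_neg _ _ _ _ (by rw [pvTok_prefix_iff]; rintro ⟨Y, hY⟩; injection hY with h1 h2; injection h2 with h2 _; exact hjk h2.symm)]
  rw [pvRep1_neg _ _ _ _ (by rw [pvTok_prefix_iff]; rintro ⟨Y, hY⟩; injection hY with h1 _; exact hk h1)]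
  rw [pvRep1_neg _ _ _ _ (by rw [pvTok_prefix_iff]; rintro ⟨Y, hY⟩; cases hY)]
  rfl

-- key b is in the table exactly when it is a key
lemma pvIsKey_mem (b : Char) (h : pvIsKey b = true) : b ∈ pvKeysC := by
  unfold pvIsKey pvSubstsC at h
  simp only [List.lookup] at h
  repeat' split at h
  all_goals simp_all [pvKeysC]

lemma pvLookup_no_brace (b : Char) : '{' ∉ (pvSubstsC.lookup b).getD [] := by
  unfold pvSubstsC
  simp only [List.lookup]
  repeat' split
  all_goals simp_all

-- fold a run of non-matching passes over a leading token
lemma pvFoldl_head_tok (pretty : Bool) (k : Char) (hk : k ≠ '{')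
    (ps : List (Char × List Char)) (hps : ∀ q ∈ ps, q.1 ≠ k) (X : List Char) :
    ps.foldl (fun s kv => pvRep1 (pvTok kv.1) (pvRep kv.1 pretty) s) (pvTok k ++ X)
      = pvTok k ++ ps.foldl (fun s kv => pvRep1 (pvTok kv.1) (pvRep kv.1 pretty) s) X := by
  induction ps generalizing X with
  | nil => rfl
  | cons q ps ih =>
      simp only [List.foldl_cons]
      rw [pvTok_head_pass q.1 k (hps q List.mem_cons_self) hk]
      exact ih (fun p hp => hps p (List.mem_cons_of_mem _ hp)) _

lemma pvFoldl_over_rep (pretty : Bool) (b : Char)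
    (ps : List (Char × List Char)) (hps : ∀ q ∈ ps, q.1 ≠ 't') (X : List Char) :
    ps.foldl (fun s kv => pvRep1 (pvTok kv.1) (pvRep kv.1 pretty) s) (pvRep b pretty ++ X)
      = pvRep b pretty ++ ps.foldl (fun s kv => pvRep1 (pvTok kv.1) (pvRep kv.1 pretty) s) X := by
  induction ps generalizing X with
  | nil => rfl
  | cons q ps ih =>
      simp only [List.foldl_cons]
      rw [pvRep1_over_rep q.1 b (hps q List.mem_cons_self) _ _ pretty (pvLookup_no_brace b)]
      exact ih (fun p hp => hps p (List.mem_cons_of_mem _ hp)) _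

-- head-token lemma: the whole A-side fold replaces a leading token and proceeds on the rest
lemma pvHT_gen (pretty : Bool) (k : Char) (v : List Char)
    (pre post : List (Char × List Char))
    (hsplit : pvSubstsC = pre ++ (k, v) :: post)
    (hpre : ∀ q ∈ pre, q.1 ≠ k) (hpost : ∀ q ∈ post, q.1 ≠ 't') (hk : k ≠ '{')
    (X : List Char) :
    pvAL pretty (pvTok k ++ X) = pvRep k pretty ++ pvAL pretty X := by
  unfold pvAL
  rw [hsplit]
  rw [List.foldl_append, List.foldl_append, List.foldl_cons, List.foldl_cons]
  rw [pvFoldl_head_tok pretty k hk pre hpre X]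
  have hstep : ∀ Y : List Char,
      pvRep1 (pvTok k) (pvRep k pretty) (pvTok k ++ Y) = pvRep k pretty ++ pvRep1 (pvTok k) (pvRep k pretty) Y := by
    intro Y
    exact pvRep1_pos k (pvRep k pretty) Y
  rw [hstep]
  exact pvFoldl_over_rep pretty k post hpost _

lemma pvHT (k : Char) (hk : k ∈ pvKeysC) (pretty : Bool) (X : List Char) :
    pvAL pretty (pvTok k ++ X) = pvRep k pretty ++ pvAL pretty X := by
  fin_cases hk
  · exact pvHT_gen pretty 'o' ['b','o','l','d'] [] [('v', ['r','e','v','e','r','s','e']), ('x', ['n','o','r','m','a','l']), ('K', ['b','l','a','c','k']), ('R', ['r','e','d']), ('G', ['g','r','e','e','n']), ('Y', ['y','e','l','l','o','w']), ('B', ['b','l','u','e']), ('M', ['m','a','g','e','n','t','a']), ('C', ['c','y','a','n']), ('W', ['w','h','i','t','e'])] (by decide) (by decide) (by decide) (by decide) X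
  · exact pvHT_gen pretty 'v' ['r','e','v','e','r','s','e'] [('o', ['b','o','l','d'])] [('x', ['n','o','r','m','a','l']), ('K', ['b','l','a','c','k']), ('R', ['r','e','d']), ('G', ['g','r','e','e','n']), ('Y', ['y','e','l','l','o','w']), ('B', ['b','l','u','e']), ('M', ['m','a','g','e','n','t','a']), ('C', ['c','y','a','n']), ('W', ['w','h','i','t','e'])] (by decide) (by decide) (by decide) (by decide) X
  · exact pvHT_gen pretty 'x' ['n','o','r','m','a','l'] [('o', ['b','o','l','d']), ('v', ['r','e','v','e','r','s','e'])] [('K', ['b','l','a','c','k']), ('R', ['r','e','d']), ('G', ['g','r','e','e','n']), ('Y', ['y','e','l','l','o','w']), ('B', ['b','l','u','e']), ('M', ['m','a','g','e','n','t','a']), ('C', ['c','y','a','n']), ('W', ['w','h','i','t','e'])] (by decide) (by decide) (by decide) (by decide) X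
  · exact pvHT_gen pretty 'K' ['b','l','a','c','k'] [('o', ['b','o','l','d']), ('v', ['r','e','v','e','r','s','e']), ('x', ['n','o','r','m','a','l'])] [('R', ['r','e','d']), ('G', ['g','r','e','e','n']), ('Y', ['y','e','l','l','o','w']), ('B', ['b','l','u','e']), ('M', ['m','a','g','e','n','t','a']), ('C', ['c','y','a','n']), ('W', ['w','h','i','t','e'])] (by decide) (by decide) (by decide) (by decide) X
  · exact pvHT_gen pretty 'R' ['r','e','d'] [('o', ['b','o','l','d']), ('v', ['r','e','v','e','r','s','e']), ('x', ['n','o','r','m','a','l']), ('K', ['b','l','a','c','k'])] [('G', ['g','r','e','e','n']), ('Y', ['y','e','l','l','o','w']), ('B', ['b','l','u','e']), ('M', ['m','a','g','e','n','t','a']), ('C', ['c','y','a','n']), ('W', ['w','h','i','t','e'])] (by decide) (by decide) (by decide) (by decide) X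
  · exact pvHT_gen pretty 'G' ['g','r','e','e','n'] [('o', ['b','o','l','d']), ('v', ['r','e','v','e','r','s','e']), ('x', ['n','o','r','m','a','l']), ('K', ['b','l','a','c','k']), ('R', ['r','e','d'])] [('Y', ['y','e','l','l','o','w']), ('B', ['b','l','u','e']), ('M', ['m','a','g','e','n','t','a']), ('C', ['c','y','a','n']), ('W', ['w','h','i','t','e'])] (by decide) (by decide) (by decide) (by decide) X
  · exact pvHT_gen pretty 'Y' ['y','e','l','l','o','w'] [('o', ['b','o','l','d']), ('v', ['r','e','v','e','r','s','e']), ('x', ['n','o','r','m','a','l']), ('K', ['b','l','a','c','k']), ('R', ['r','e','d']), ('G', ['g','r','e','e','n'])] [('B', ['b','l','u','e']), ('M', ['m','a','g','e','n','t','a']), ('C', ['c','y','a','n']), ('W', ['w','h','i','t','e'])] (by decide) (by decide) (by decide) (by decide) X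
  · exact pvHT_gen pretty 'B' ['b','l','u','e'] [('o', ['b','o','l','d']), ('v', ['r','e','v','e','r','s','e']), ('x', ['n','o','r','m','a','l']), ('K', ['b','l','a','c','k']), ('R', ['r','e','d']), ('G', ['g','r','e','e','n']), ('Y', ['y','e','l','l','o','w'])] [('M', ['m','a','g','e','n','t','a']), ('C', ['c','y','a','n']), ('W', ['w','h','i','t','e'])] (by decide) (by decide) (by decide) (by decide) X
  · exact pvHT_gen pretty 'M' ['m','a','g','e','n','t','a'] [('o', ['b','o','l','d']), ('v', ['r','e','v','e','r','s','e']), ('x', ['n','o','r','m','a','l']), ('K', ['b','l','a','c','k']), ('R', ['r','e','d']), ('G', ['g','r','e','e','n']), ('Y', ['y','e','l','l','o','w']), ('B', ['b','l','u','e'])] [('C', ['c','y','a','n']), ('W', ['w','h','i','t','e'])] (by decide) (by decide) (by decide) (by decide) X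
  · exact pvHT_gen pretty 'C' ['c','y','a','n'] [('o', ['b','o','l','d']), ('v', ['r','e','v','e','r','s','e']), ('x', ['n','o','r','m','a','l']), ('K', ['b','l','a','c','k']), ('R', ['r','e','d']), ('G', ['g','r','e','e','n']), ('Y', ['y','e','l','l','o','w']), ('B', ['b','l','u','e']), ('M', ['m','a','g','e','n','t','a'])] [('W', ['w','h','i','t','e'])] (by decide) (by decide) (by decide) (by decide) X
  · exact pvHT_gen pretty 'W' ['w','h','i','t','e'] [('o', ['b','o','l','d']), ('v', ['r','e','v','e','r','s','e']), ('x', ['n','o','r','m','a','l']), ('K', ['b','l','a','c','k']), ('R', ['r','e','d']), ('G', ['g','r','e','e','n']), ('Y', ['y','e','l','l','o','w']), ('B', ['b','l','u','e']), ('M', ['m','a','g','e','n','t','a']), ('C', ['c','y','a','n'])] [] (by decide) (by decide) (by decide) (by decide) X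

-- ====== non-pretty analysis: deletions, runs, interleavings ======

lemma pvRUN (k : Char) (X : List Char) :
    ∃ n X', X = pvTokPow k n ++ X' ∧ ¬ pvTok k <+: X' ∧
      pvRep1 (pvTok k) [] X = pvRep1 (pvTok k) [] X' := by
  suffices H : ∀ (m : Nat) (X : List Char), X.length ≤ m → ∃ n X', X = pvTokPow k n ++ X' ∧
      ¬ pvTok k <+: X' ∧ pvRep1 (pvTok k) [] X = pvRep1 (pvTok k) [] X' from H X.length X le_rfl
  intro m
  induction m with
  | zero =>
      intro X hX
      have : X = [] := List.eq_nil_of_length_eq_zero (by omega)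
      subst this
      refine ⟨0, [], rfl, ?_, rfl⟩
      rw [pvTok_prefix_iff]; rintro ⟨Y, hY⟩; cases hY
  | succ m ih =>
      intro X hX
      by_cases hp : pvTok k <+: X
      · obtain ⟨Y, rfl⟩ := (pvTok_prefix_iff k X).mp hp
        have hY : Y.length ≤ m := by simp at hX; omega
        obtain ⟨n, X', h1, h2, h3⟩ := ih Y hY
        refine ⟨n + 1, X', ?_, h2, ?_⟩
        · rw [pvTokPow, List.cons_append, List.cons_append, List.cons_append, h1]
        · rw [pvRep1_pos, h3]; rfl
      · exact ⟨0, X, rfl, hp, rfl⟩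

lemma pvPRE (k : Char) : ∀ (X w : List Char), w <+: pvRep1 (pvTok k) [] X → pvInter k w X := by
  suffices H : ∀ (m : Nat) (X : List Char), X.length ≤ m → ∀ w, w <+: pvRep1 (pvTok k) [] X → pvInter k w X from
    fun X w h => H X.length X le_rfl w h
  intro m
  induction m with
  | zero =>
      intro X hX w hw
      have : X = [] := List.eq_nil_of_length_eq_zero (by omega)
      subst this
      rw [pvRep1_nil] at hw
      have : w = [] := List.prefix_nil.mp hw
      subst this
      trivial
  | succ m ih =>
      intro X hX w hw
      cases w with
      | nil => trivial
      | cons c w' =>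
          obtain ⟨n, X', hsplit, hnp, heq⟩ := pvRUN k X
          rw [heq] at hw
          cases X' with
          | nil =>
              rw [pvRep1_nil] at hw
              exact absurd (List.prefix_nil.mp hw) (by simp)
          | cons e T =>
              rw [pvRep1_neg _ _ _ _ hnp] at hw
              obtain ⟨hce, hw'⟩ := List.cons_prefix_cons.mp hw
              have hTlen : T.length ≤ m := by
                have : X.length = 3 * n + T.length + 1 := by
                  subst hsplit
                  have : ∀ j, (pvTokPow k j).length = 3 * j := by
                    intro j; induction j with
                    | zero => rfl
                    | succ i ihh => simp [pvTokPow, ihh]; omega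
                  simp [this]; omega
                omega
              exact ⟨n, T, by rw [hsplit, hce], ih T hTlen w' hw'⟩

lemma pvSUF (k : Char) : ∀ (X s : List Char), s <:+ pvRep1 (pvTok k) [] X →
    ∃ S, S <:+ X ∧ s = pvRep1 (pvTok k) [] S := by
  suffices H : ∀ (m : Nat) (X : List Char), X.length ≤ m → ∀ s, s <:+ pvRep1 (pvTok k) [] X →
      ∃ S, S <:+ X ∧ s = pvRep1 (pvTok k) [] S from fun X s h => H X.length X le_rfl s h
  intro m
  induction m with
  | zero =>
      intro X hX s hs
      have : X = [] := List.eq_nil_of_length_eq_zero (by omega)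
      subst this
      rw [pvRep1_nil] at hs
      exact ⟨[], List.nil_suffix, by rw [List.suffix_nil.mp hs, pvRep1_nil]⟩
  | succ m ih =>
      intro X hX s hs
      obtain ⟨n, X', hsplit, hnp, heq⟩ := pvRUN k X
      rw [heq] at hs
      cases X' with
      | nil =>
          rw [pvRep1_nil] at hs
          exact ⟨[], List.nil_suffix, by rw [List.suffix_nil.mp hs, pvRep1_nil]⟩
      | cons e T =>
          rw [pvRep1_neg _ _ _ _ hnp] at hs
          rcases List.suffix_cons_iff.mp hs with hcase | hcase
          · refine ⟨e :: T, ⟨pvTokPow k n, hsplit.symm⟩, ?_⟩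
            rw [pvRep1_neg _ _ _ _ hnp, hcase]
          · have hTlen : T.length ≤ m := by
              have hlen := congrArg List.length hsplit
              simp at hlen
              omega
            obtain ⟨S, hS1, hS2⟩ := ih T hTlen s hcase
            refine ⟨S, ?_, hS2⟩
            refine hS1.trans ?_
            refine (List.suffix_cons e T).trans ?_
            exact ⟨pvTokPow k n, hsplit.symm⟩

lemma pvINF (k : Char) (X w : List Char) (h : w <:+: pvRep1 (pvTok k) [] X) :
    ∃ S, S <:+ X ∧ pvInter k w S := by
  obtain ⟨t, hwt, hts⟩ := List.infix_iff_prefix_suffix.mp h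
  obtain ⟨S, hS1, hS2⟩ := pvSUF k X t hts
  exact ⟨S, hS1, pvPRE k S w (hS2 ▸ hwt)⟩

lemma pvP1_of (k : Char) (n : Nat) (R : List Char) :
    ['{','{',k,'}'] <:+: ('{' :: (pvTokPow k (n + 1) ++ R)) := by
  refine ⟨[], pvTokPow k n ++ R, ?_⟩
  simp [pvTokPow]

lemma pvP2_of (k : Char) : ∀ (n : Nat) (R : List Char),
    ['{',k,'}','}'] <:+: (pvTokPow k (n + 1) ++ '}' :: R) := by
  intro n
  induction n with
  | zero =>
      intro R
      refine ⟨[], R, ?_⟩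
      simp [pvTokPow]
  | succ m ih =>
      intro R
      refine (ih R).trans ?_
      refine List.IsSuffix.isInfix ⟨['{', k, '}'], ?_⟩
      simp [pvTokPow]

lemma pvGood_of_infix (m l : List Char) (h : m <:+: l) (hg : pvGood l) : pvGood m := by
  intro k hk
  exact ⟨fun hc => (hg k hk).1 (hc.trans h), fun hc => (hg k hk).2 (hc.trans h)⟩

lemma pvPass_comm (k : Char) (hk : k ∈ pvKeysC) (r : List Char) (c : Char) (Y : List Char)
    (hs : pvHeadSafe (c :: Y)) :
    pvRep1 (pvTok k) r (c :: Y) = c :: pvRep1 (pvTok k) r Y := by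
  apply pvRep1_neg
  rw [pvTok_prefix_iff]
  rintro ⟨X, hX⟩
  exact hs k X hX hk

lemma pvSuf_infix {s X : List Char} (c : Char) (h : s <:+ X) : s <:+: c :: X :=
  (h.trans (List.suffix_cons c X)).isInfix

lemma pvP1_contra (k : Char) (hk : k ∈ pvKeysC) (L : List Char) (hg : pvGood L)
    (Si Sj : List Char) (n : Nat) (hrun : Si = pvTokPow k (n + 1) ++ Sj)
    (h : ('{' :: Si) <:+: L) : False := by
  refine (hg k hk).1 (List.IsInfix.trans ?_ h)
  rw [hrun]
  exact pvP1_of k n Sj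

lemma pvP2_contra (k : Char) (hk : k ∈ pvKeysC) (L : List Char) (hg : pvGood L)
    (Si Sj : List Char) (n : Nat) (hrun : Si = pvTokPow k (n + 1) ++ '}' :: Sj)
    (h : Si <:+: L) : False := by
  refine (hg k hk).2 (List.IsInfix.trans ?_ h)
  rw [hrun]
  exact pvP2_of k n Sj

lemma pvPRES (k : Char) (hk : k ∈ pvKeysC) (c : Char) (X : List Char)
    (hg : pvGood (c :: X)) (hs : pvHeadSafe (c :: X)) :
    pvGood (c :: pvRep1 (pvTok k) [] X) ∧ pvHeadSafe (c :: pvRep1 (pvTok k) [] X) := by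
  have hXinf : ∀ {s : List Char}, s <:+ X → s <:+: c :: X := fun h => pvSuf_infix c h
  constructor
  · intro j hj
    constructor
    · -- no '{{j}' in the image
      intro h
      rcases (List.infix_cons_iff).mp h with hpre | htail
      · -- pattern at the head: c = '{' and '{j}' is a prefix of the image
        obtain ⟨hc, hpre2⟩ := List.cons_prefix_cons.mp hpre
        subst hc
        have hI := pvPRE k X _ hpre2
        simp only [pvInter] at hI
        obtain ⟨a, S1, hA, b, S2, hB, c2, S3, hC, -⟩ := hI
        have hS1X : '{' :: S1 <:+ X := hA ▸ List.suffix_append _ _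
        have hS2S1 : j :: S2 <:+ S1 := hB ▸ List.suffix_append _ _
        have hS2X : S2 <:+ X := ((List.suffix_cons j S2).trans hS2S1).trans
          ((List.suffix_cons '{' S1).trans hS1X)
        cases a with
        | succ a' =>
            exact pvP1_contra k hk _ hg X ('{' :: S1) a' hA List.infix_rfl
        | zero =>
          simp only [pvTokPow, List.nil_append] at hA
          cases b with
          | succ b' =>
              exact pvP1_contra k hk _ hg S1 (j :: S2) b' hB (hXinf hS1X)
          | zero =>
            simp only [pvTokPow, List.nil_append] at hB
            cases c2 with
            | succ c2' =>
                exact pvP2_contra k hk _ hg S2 S3 c2' hC (hXinf hS2X)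
            | zero =>
                simp only [pvTokPow, List.nil_append] at hC
                refine (hg j hj).1 ?_
                refine List.IsPrefix.isInfix ⟨S3, ?_⟩
                rw [hA, hB, hC]
                simp
      · -- pattern inside the image
        obtain ⟨S, hSX, hI⟩ := pvINF k X _ htail
        simp only [pvInter] at hI
        obtain ⟨a, S1, hA, b, S2, hB, c2, S3, hC, d2, S4, hD, -⟩ := hI
        have hS1S : '{' :: S1 <:+ S := hA ▸ List.suffix_append _ _
        have hS2S1 : '{' :: S2 <:+ S1 := hB ▸ List.suffix_append _ _
        have hS3S2 : j :: S3 <:+ S2 := hC ▸ List.suffix_append _ _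
        have hS1X : '{' :: S1 <:+ X := hS1S.trans hSX
        have hS2X : '{' :: S2 <:+ X := (hS2S1.trans ((List.suffix_cons '{' S1).trans hS1X))
        have hS3X : S3 <:+ X := (List.suffix_cons j S3).trans
          (hS3S2.trans ((List.suffix_cons '{' S2).trans hS2X))
        cases b with
        | succ b' => exact pvP1_contra k hk _ hg S1 ('{' :: S2) b' hB (hXinf hS1X)
        | zero =>
          simp only [pvTokPow, List.nil_append] at hB
          cases c2 with
          | succ c2' => exact pvP1_contra k hk _ hg S2 (j :: S3) c2' hC (hXinf hS2X)
          | zero =>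
            simp only [pvTokPow, List.nil_append] at hC
            cases d2 with
            | succ d2' => exact pvP2_contra k hk _ hg S3 S4 d2' hD (hXinf hS3X)
            | zero =>
                simp only [pvTokPow, List.nil_append] at hD
                refine (hg j hj).1 ?_
                refine List.IsInfix.trans ?_ (hXinf hS1X)
                rw [hB, hC, hD]
                exact List.IsPrefix.isInfix ⟨S4, rfl⟩
    · -- no '{j}}' in the image
      intro h
      rcases (List.infix_cons_iff).mp h with hpre | htail
      · obtain ⟨hc, hpre2⟩ := List.cons_prefix_cons.mp hpre
        subst hc
        have hI := pvPRE k X _ hpre2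
        simp only [pvInter] at hI
        obtain ⟨a, S1, hA, b, S2, hB, c2, S3, hC, -⟩ := hI
        have hS1X : j :: S1 <:+ X := hA ▸ List.suffix_append _ _
        have hS2S1 : '}' :: S2 <:+ S1 := hB ▸ List.suffix_append _ _
        have hS2X : S2 <:+ X := ((List.suffix_cons '}' S2).trans hS2S1).trans
          ((List.suffix_cons j S1).trans hS1X)
        cases a with
        | succ a' =>
            exact pvP1_contra k hk _ hg X (j :: S1) a' hA List.infix_rfl
        | zero =>
          simp only [pvTokPow, List.nil_append] at hA
          cases b with
          | succ b' => exact pvP2_contra k hk _ hg S1 S2 b' hB (hXinf ((List.suffix_cons j S1).trans hS1X))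
          | zero =>
            simp only [pvTokPow, List.nil_append] at hB
            cases c2 with
            | succ c2' => exact pvP2_contra k hk _ hg S2 S3 c2' hC (hXinf hS2X)
            | zero =>
                simp only [pvTokPow, List.nil_append] at hC
                refine (hg j hj).2 ?_
                refine List.IsPrefix.isInfix ⟨S3, ?_⟩
                rw [hA, hB, hC]
                simp
      · obtain ⟨S, hSX, hI⟩ := pvINF k X _ htail
        simp only [pvInter] at hI
        obtain ⟨a, S1, hA, b, S2, hB, c2, S3, hC, d2, S4, hD, -⟩ := hI
        have hS1S : '{' :: S1 <:+ S := hA ▸ List.suffix_append _ _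
        have hS2S1 : j :: S2 <:+ S1 := hB ▸ List.suffix_append _ _
        have hS3S2 : '}' :: S3 <:+ S2 := hC ▸ List.suffix_append _ _
        have hS1X : '{' :: S1 <:+ X := hS1S.trans hSX
        have hS2X : S2 <:+ X := (List.suffix_cons j S2).trans
          (hS2S1.trans ((List.suffix_cons '{' S1).trans hS1X))
        have hS3X : S3 <:+ X := (List.suffix_cons '}' S3).trans (hS3S2.trans hS2X)
        cases b with
        | succ b' => exact pvP1_contra k hk _ hg S1 (j :: S2) b' hB (hXinf hS1X)
        | zero =>
          simp only [pvTokPow, List.nil_append] at hB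
          cases c2 with
          | succ c2' => exact pvP2_contra k hk _ hg S2 S3 c2' hC (hXinf hS2X)
          | zero =>
            simp only [pvTokPow, List.nil_append] at hC
            cases d2 with
            | succ d2' => exact pvP2_contra k hk _ hg S3 S4 d2' hD (hXinf hS3X)
            | zero =>
                simp only [pvTokPow, List.nil_append] at hD
                refine (hg j hj).2 ?_
                refine List.IsInfix.trans ?_ (hXinf hS1X)
                rw [hB, hC, hD]
                exact List.IsPrefix.isInfix ⟨S4, rfl⟩
  · -- head safety of the image
    intro e R heq
    have hc : c = '{' := by injection heq
    subst hc
    have himg : pvRep1 (pvTok k) [] X = e :: '}' :: R := by injection heq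
    intro he
    have hpre : [e, '}'] <+: pvRep1 (pvTok k) [] X := by rw [himg]; exact ⟨R, rfl⟩
    have hI := pvPRE k X _ hpre
    simp only [pvInter] at hI
    obtain ⟨a, S1, hA, b, S2, hB, -⟩ := hI
    have hS1X : e :: S1 <:+ X := hA ▸ List.suffix_append _ _
    cases a with
    | succ a' =>
        exact pvP1_contra k hk _ hg X (e :: S1) a' hA List.infix_rfl
    | zero =>
      simp only [pvTokPow, List.nil_append] at hA
      cases b with
      | succ b' =>
          exact pvP2_contra k hk _ hg S1 S2 b' hB (pvSuf_infix '{' ((List.suffix_cons e S1).trans hS1X))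
      | zero =>
          simp only [pvTokPow, List.nil_append] at hB
          exact hs e S2 (by rw [hA, hB]) he

lemma pvSTEP (k : Char) (r T : List Char) :
    (∃ Z, T = pvTok k ++ Z) ∨ T = [] ∨
      (∃ h Z, T = h :: Z ∧ pvRep1 (pvTok k) r T = h :: pvRep1 (pvTok k) r Z) := by
  by_cases hp : pvTok k <+: T
  · exact Or.inl ((pvTok_prefix_iff k T).mp hp |>.imp fun X hX => hX)
  · cases T with
    | nil => exact Or.inr (Or.inl rfl)
    | cons h Z => exact Or.inr (Or.inr ⟨h, Z, rfl, pvRep1_neg k r h Z hp⟩)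

lemma pvPQP (k : Char) (hk : k ∈ pvKeysC) (c : Char) (X : List Char)
    (hs : pvHeadSafe (c :: X)) :
    pvHeadSafe (c :: pvRep1 (pvTok k) (pvRep k true) X) := by
  intro e R heq
  have hc : c = '{' := by injection heq
  subst hc
  have himg : pvRep1 (pvTok k) (pvRep k true) X = e :: '}' :: R := by injection heq
  rcases pvSTEP k (pvRep k true) X with ⟨Z, rfl⟩ | rfl | ⟨h1, Z, rfl, hstep⟩
  · rw [show pvTok k ++ Z = '{' :: k :: '}' :: Z from rfl, pvRep1_pos] at himg
    rw [show pvRep k true = '{' :: 't' :: '.' :: ((pvSubstsC.lookup k).getD []) ++ ['}'] from rfl] at himg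
    have : 't' = '}' := by
      have := congrArg (fun l => l.tail.head?) himg
      simpa using this
    exact absurd this (by decide)
  · rw [pvRep1_nil] at himg; cases himg
  · rw [hstep] at himg
    have he : e = h1 := by injection himg with h _; exact h.symm
    have himg2 : pvRep1 (pvTok k) (pvRep k true) Z = '}' :: R := by injection himg
    rcases pvSTEP k (pvRep k true) Z with ⟨W, rfl⟩ | rfl | ⟨h2, W, rfl, hstep2⟩
    · rw [show pvTok k ++ W = '{' :: k :: '}' :: W from rfl, pvRep1_pos] at himg2
      rw [show pvRep k true = '{' :: 't' :: '.' :: ((pvSubstsC.lookup k).getD []) ++ ['}'] from rfl] at himg2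
      have : '{' = '}' := by injection himg2
      exact absurd this (by decide)
    · rw [pvRep1_nil] at himg2; cases himg2
    · rw [hstep2] at himg2
      have h2eq : h2 = '}' := by injection himg2
      subst h2eq he
      exact hs e W rfl

lemma pvNH (pretty : Bool) (ps : List (Char × List Char)) (hps : ∀ q ∈ ps, q.1 ∈ pvKeysC)
    (c : Char) (X : List Char) (hs : pvHeadSafe (c :: X))
    (hg : pretty = false → pvGood (c :: X)) :
    ps.foldl (fun s kv => pvRep1 (pvTok kv.1) (pvRep kv.1 pretty) s) (c :: X)
      = c :: ps.foldl (fun s kv => pvRep1 (pvTok kv.1) (pvRep kv.1 pretty) s) X := by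
  induction ps generalizing X with
  | nil => rfl
  | cons q ps ih =>
      have hq : q.1 ∈ pvKeysC := hps q List.mem_cons_self
      simp only [List.foldl_cons]
      rw [pvPass_comm q.1 hq _ c X hs]
      cases pretty with
      | true =>
          exact ih (fun p hp => hps p (List.mem_cons_of_mem _ hp)) _
            (pvPQP q.1 hq c X hs) (fun h => absurd h (by decide))
      | false =>
          have hgood := hg rfl
          obtain ⟨hg', hs'⟩ := pvPRES q.1 hq c X hgood hs
          exact ih (fun p hp => hps p (List.mem_cons_of_mem _ hp)) _ hs' (fun _ => hg')

lemma pvFoldl_short (pretty : Bool) (ps : List (Char × List Char)) (l : List Char)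
    (h : l.length < 3) :
    ps.foldl (fun s kv => pvRep1 (pvTok kv.1) (pvRep kv.1 pretty) s) l = l := by
  induction ps with
  | nil => rfl
  | cons q ps ih => simp only [List.foldl_cons]; rw [pvRep1_short _ _ _ h]; exact ih

lemma pvAL_short (pretty : Bool) (l : List Char) (h : l.length < 3) : pvAL pretty l = l :=
  pvFoldl_short pretty pvSubstsC l h

lemma pvScan_short (pretty : Bool) (l : List Char) (h : l.length < 3) : pvScan pretty l = l := by
  match l, h with
  | [], _ => simp [pvScan]
  | [a], _ => simp [pvScan]
  | [a, b], _ => simp [pvScan]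

lemma pvScan_cons3 (pretty : Bool) (a b c : Char) (rest : List Char) :
    pvScan pretty (a :: b :: c :: rest) =
      if a = '{' ∧ c = '}' ∧ pvIsKey b then pvRep b pretty ++ pvScan pretty rest
      else a :: pvScan pretty (b :: c :: rest) := by
  rw [pvScan]

lemma pvMem_isKey (b : Char) (h : b ∈ pvKeysC) : pvIsKey b = true := by
  fin_cases h <;> decide

lemma pvMAIN (pretty : Bool) : ∀ (cs : List Char), (pretty = false → pvGood cs) →
    pvAL pretty cs = pvScan pretty cs := by
  suffices H : ∀ (m : Nat) (cs : List Char), cs.length ≤ m → (pretty = false → pvGood cs) →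
      pvAL pretty cs = pvScan pretty cs from fun cs h => H cs.length cs le_rfl h
  intro m
  induction m with
  | zero =>
      intro cs hlen hg
      have : cs = [] := List.eq_nil_of_length_eq_zero (by omega)
      subst this
      rw [pvAL_short pretty [] (by simp), pvScan_short pretty [] (by simp)]
  | succ m ih =>
      intro cs hlen hg
      match cs, hlen with
      | [], _ => rw [pvAL_short pretty [] (by simp), pvScan_short pretty [] (by simp)]
      | [a], _ => rw [pvAL_short pretty [a] (by simp), pvScan_short pretty [a] (by simp)]
      | [a, b], _ => rw [pvAL_short pretty [a, b] (by simp), pvScan_short pretty [a, b] (by simp)]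
      | a :: b :: c :: rest, hlen =>
          rw [pvScan_cons3]
          by_cases hcond : a = '{' ∧ c = '}' ∧ pvIsKey b
          · obtain ⟨rfl, rfl, hkey⟩ := hcond
            rw [if_pos ⟨rfl, rfl, hkey⟩]
            have hmem := pvIsKey_mem b hkey
            have hHT := pvHT b hmem pretty rest
            rw [show '{' :: b :: '}' :: rest = pvTok b ++ rest from rfl, hHT]
            congr 1
            refine ih rest (by simp at hlen; omega) ?_
            intro hf
            refine pvGood_of_infix rest _ ?_ (hg hf)
            exact (List.suffix_cons '}' rest |>.trans ((List.suffix_cons b _).trans (List.suffix_cons '{' _))).isInfix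
          · rw [if_neg hcond]
            have hsafe : pvHeadSafe (a :: b :: c :: rest) := by
              intro e R heq
              intro he
              have ha : a = '{' := by injection heq
              have hb : b = e := by injection heq; simp_all
              have hc : c = '}' := by
                have := congrArg (fun l => l.tail.tail.head?) heq
                simpa using this
              exact hcond ⟨ha, hc, by rw [hb]; exact pvMem_isKey e he⟩
            have hNH := pvNH pretty pvSubstsC (by decide) a (b :: c :: rest) hsafe
              (fun hf => hg hf)
            rw [show pvAL pretty (a :: b :: c :: rest)
                = pvSubstsC.foldl (fun s kv => pvRep1 (pvTok kv.1) (pvRep kv.1 pretty) s) (a :: b :: c :: rest) from rfl]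
            rw [hNH]
            congr 1
            refine ih (b :: c :: rest) (by simp at hlen ⊢; omega) ?_
            intro hf
            exact pvGood_of_infix _ _ (List.suffix_cons a _).isInfix (hg hf)

lemma pvChrep_tok (k : Char) (new s : List Char) :
    PySem.Chars.replace s ('{' :: k :: '}' :: []) new = pvRep1 ('{' :: k :: '}' :: []) new s :=
  pvReplace_eq_rep1 _ _ _ (by simp)

lemma pvA_bridge (text : String) (pretty : Bool) :
    blessify text pretty = String.ofList (pvAL pretty text.toList) := by
  apply String.toList_inj.mp
  cases pretty with
  | false =>
      simp [blessify, pvSubsts, pvAL, pvSubstsC, pvRep, pvTok,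
        PySem.Str.toList_replace, pvChrep_tok]
  | true =>
      simp [blessify, pvSubsts, pvAL, pvSubstsC, pvRep, pvTok, List.lookup,
        PySem.Str.toList_replace, pvChrep_tok]

lemma pvPre_good (text : String) (h : ∀ p ∈ pvBadPats, PySem.Str.isIn p text = false) :
    pvGood text.toList := by
  intro k hk
  fin_cases hk
  · constructor
    · intro hinf
      have hx := h "{{o}" (by decide)
      have : PySem.Str.isIn "{{o}" text = true := (PySem.Str.isIn_iff_infix _ _).mpr (by
        rw [show ("{{o}" : String).toList = ['{', '{', 'o', '}'] from by decide]; exact hinf)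
      rw [hx] at this; cases this
    · intro hinf
      have hx := h "{o}}" (by decide)
      have : PySem.Str.isIn "{o}}" text = true := (PySem.Str.isIn_iff_infix _ _).mpr (by
        rw [show ("{o}}" : String).toList = ['{', 'o', '}', '}'] from by decide]; exact hinf)
      rw [hx] at this; cases this
  · constructor
    · intro hinf
      have hx := h "{{v}" (by decide)
      have : PySem.Str.isIn "{{v}" text = true := (PySem.Str.isIn_iff_infix _ _).mpr (by
        rw [show ("{{v}" : String).toList = ['{', '{', 'v', '}'] from by decide]; exact hinf)
      rw [hx] at this; cases this
    · intro hinf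
      have hx := h "{v}}" (by decide)
      have : PySem.Str.isIn "{v}}" text = true := (PySem.Str.isIn_iff_infix _ _).mpr (by
        rw [show ("{v}}" : String).toList = ['{', 'v', '}', '}'] from by decide]; exact hinf)
      rw [hx] at this; cases this
  · constructor
    · intro hinf
      have hx := h "{{x}" (by decide)
      have : PySem.Str.isIn "{{x}" text = true := (PySem.Str.isIn_iff_infix _ _).mpr (by
        rw [show ("{{x}" : String).toList = ['{', '{', 'x', '}'] from by decide]; exact hinf)
      rw [hx] at this; cases this
    · intro hinf
      have hx := h "{x}}" (by decide)
      have : PySem.Str.isIn "{x}}" text = true := (PySem.Str.isIn_iff_infix _ _).mpr (by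
        rw [show ("{x}}" : String).toList = ['{', 'x', '}', '}'] from by decide]; exact hinf)
      rw [hx] at this; cases this
  · constructor
    · intro hinf
      have hx := h "{{K}" (by decide)
      have : PySem.Str.isIn "{{K}" text = true := (PySem.Str.isIn_iff_infix _ _).mpr (by
        rw [show ("{{K}" : String).toList = ['{', '{', 'K', '}'] from by decide]; exact hinf)
      rw [hx] at this; cases this
    · intro hinf
      have hx := h "{K}}" (by decide)
      have : PySem.Str.isIn "{K}}" text = true := (PySem.Str.isIn_iff_infix _ _).mpr (by
        rw [show ("{K}}" : String).toList = ['{', 'K', '}', '}'] from by decide]; exact hinf)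
      rw [hx] at this; cases this
  · constructor
    · intro hinf
      have hx := h "{{R}" (by decide)
      have : PySem.Str.isIn "{{R}" text = true := (PySem.Str.isIn_iff_infix _ _).mpr (by
        rw [show ("{{R}" : String).toList = ['{', '{', 'R', '}'] from by decide]; exact hinf)
      rw [hx] at this; cases this
    · intro hinf
      have hx := h "{R}}" (by decide)
      have : PySem.Str.isIn "{R}}" text = true := (PySem.Str.isIn_iff_infix _ _).mpr (by
        rw [show ("{R}}" : String).toList = ['{', 'R', '}', '}'] from by decide]; exact hinf)
      rw [hx] at this; cases this
  · constructor
    · intro hinf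
      have hx := h "{{G}" (by decide)
      have : PySem.Str.isIn "{{G}" text = true := (PySem.Str.isIn_iff_infix _ _).mpr (by
        rw [show ("{{G}" : String).toList = ['{', '{', 'G', '}'] from by decide]; exact hinf)
      rw [hx] at this; cases this
    · intro hinf
      have hx := h "{G}}" (by decide)
      have : PySem.Str.isIn "{G}}" text = true := (PySem.Str.isIn_iff_infix _ _).mpr (by
        rw [show ("{G}}" : String).toList = ['{', 'G', '}', '}'] from by decide]; exact hinf)
      rw [hx] at this; cases this
  · constructor
    · intro hinf
      have hx := h "{{Y}" (by decide)
      have : PySem.Str.isIn "{{Y}" text = true := (PySem.Str.isIn_iff_infix _ _).mpr (by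
        rw [show ("{{Y}" : String).toList = ['{', '{', 'Y', '}'] from by decide]; exact hinf)
      rw [hx] at this; cases this
    · intro hinf
      have hx := h "{Y}}" (by decide)
      have : PySem.Str.isIn "{Y}}" text = true := (PySem.Str.isIn_iff_infix _ _).mpr (by
        rw [show ("{Y}}" : String).toList = ['{', 'Y', '}', '}'] from by decide]; exact hinf)
      rw [hx] at this; cases this
  · constructor
    · intro hinf
      have hx := h "{{B}" (by decide)
      have : PySem.Str.isIn "{{B}" text = true := (PySem.Str.isIn_iff_infix _ _).mpr (by
        rw [show ("{{B}" : String).toList = ['{', '{', 'B', '}'] from by decide]; exact hinf)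
      rw [hx] at this; cases this
    · intro hinf
      have hx := h "{B}}" (by decide)
      have : PySem.Str.isIn "{B}}" text = true := (PySem.Str.isIn_iff_infix _ _).mpr (by
        rw [show ("{B}}" : String).toList = ['{', 'B', '}', '}'] from by decide]; exact hinf)
      rw [hx] at this; cases this
  · constructor
    · intro hinf
      have hx := h "{{M}" (by decide)
      have : PySem.Str.isIn "{{M}" text = true := (PySem.Str.isIn_iff_infix _ _).mpr (by
        rw [show ("{{M}" : String).toList = ['{', '{', 'M', '}'] from by decide]; exact hinf)
      rw [hx] at this; cases this
    · intro hinf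
      have hx := h "{M}}" (by decide)
      have : PySem.Str.isIn "{M}}" text = true := (PySem.Str.isIn_iff_infix _ _).mpr (by
        rw [show ("{M}}" : String).toList = ['{', 'M', '}', '}'] from by decide]; exact hinf)
      rw [hx] at this; cases this
  · constructor
    · intro hinf
      have hx := h "{{C}" (by decide)
      have : PySem.Str.isIn "{{C}" text = true := (PySem.Str.isIn_iff_infix _ _).mpr (by
        rw [show ("{{C}" : String).toList = ['{', '{', 'C', '}'] from by decide]; exact hinf)
      rw [hx] at this; cases this
    · intro hinf
      have hx := h "{C}}" (by decide)
      have : PySem.Str.isIn "{C}}" text = true := (PySem.Str.isIn_iff_infix _ _).mpr (by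
        rw [show ("{C}}" : String).toList = ['{', 'C', '}', '}'] from by decide]; exact hinf)
      rw [hx] at this; cases this
  · constructor
    · intro hinf
      have hx := h "{{W}" (by decide)
      have : PySem.Str.isIn "{{W}" text = true := (PySem.Str.isIn_iff_infix _ _).mpr (by
        rw [show ("{{W}" : String).toList = ['{', '{', 'W', '}'] from by decide]; exact hinf)
      rw [hx] at this; cases this
    · intro hinf
      have hx := h "{W}}" (by decide)
      have : PySem.Str.isIn "{W}}" text = true := (PySem.Str.isIn_iff_infix _ _).mpr (by
        rw [show ("{W}}" : String).toList = ['{', 'W', '}', '}'] from by decide]; exact hinf)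
      rw [hx] at this; cases this

-- ===== VERDICT (by name: the statement is the Claim_ definition above) =====
theorem blessify_spec : Claim_equal_blessify := by
  intro text pretty _ hpre
  unfold Spec_blessify blessify_alt
  rw [pvA_bridge]
  refine congrArg String.ofList ?_
  apply pvMAIN
  intro hfalse
  rcases hpre with h | h
  · rw [h] at hfalse; cases hfalse
  · exact pvPre_good text h
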